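-- pv_equiv track=rewrite | github.com/gokaygunduz-gg/bolge-karma-2026 | generate_rankings_json.py | _top3_events_constrained
-- ===== SOURCE A (Python) =====
-- def _top3_events_constrained(event_scores: dict) -> set:
--     fifties     = sorted([(s,d,p) for (s,d),p in event_scores.items() if d==50 and p>0], key=lambda x:-x[2])
--     non_fifties = sorted([(s,d,p) for (s,d),p in event_scores.items() if d!=50 and p>0], key=lambda x:-x[2])
--     selected = []
--     used_50  = False
--     i = 0
--     while len(selected) < 3:
--         nf = non_fifties[i] if i < len(non_fifties) else None
--         f  = fifties[0] if (not used_50 and fifties) else None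
--         nf_pts = nf[2] if nf else -1
--         f_pts  = f[2]  if f  else -1
--         if nf_pts < 0 and f_pts < 0:
--             break
--         if f_pts > nf_pts:
--             selected.append((f[0], f[1]))
--             used_50 = True
--         else:
--             if nf:
--                 selected.append((nf[0], nf[1]))
--                 i += 1
--             else:
--                 break
--     return set(selected)
-- ===== SOURCE B (Python) =====
-- # B: single O(n) pass keeping the best fifty (first maximum) and the top-3
-- # non-fifties (stable, descending), then one bounded insert -- no sorting.
-- def _insert_desc(item, top):
--     if top and item[2] <= top[0][2]:
--         return [top[0]] + _insert_desc(item, top[1:])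
--     return [item] + top
--
-- def _top3_events_constrained(event_scores: dict) -> set:
--     best50 = None            # best fifty seen so far (s, d, p): first maximum
--     t1 = t2 = t3 = None      # top-3 non-fifties, stable, descending by p
--     for (s, d), p in event_scores.items():
--         if p <= 0:
--             continue
--         if d == 50:
--             if best50 is None or best50[2] < p:
--                 best50 = (s, d, p)
--         elif t1 is None or p > t1[2]:
--             t1, t2, t3 = (s, d, p), t1, t2
--         elif t2 is None or p > t2[2]:
--             t2, t3 = (s, d, p), t2
--         elif t3 is None or p > t3[2]:
--             t3 = (s, d, p)
--     top = [t for t in (t1, t2, t3) if t is not None]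
--     if best50 is not None:
--         top = _insert_desc(best50, top)
--     return {(s, d) for s, d, p in top[:3]}
-- ===== Notes on version B (the rewrite author's own statement) =====
-- stated objective: faster
-- what changed: A sorts both the fifty and non-fifty event lists and merges them with an index-driven while loop; B makes a single linear pass keeping only the best fifty (first maximum) and the stable top-3 non-fifties, then does one bounded insert, so no sorting at all.
import Mathlib
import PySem

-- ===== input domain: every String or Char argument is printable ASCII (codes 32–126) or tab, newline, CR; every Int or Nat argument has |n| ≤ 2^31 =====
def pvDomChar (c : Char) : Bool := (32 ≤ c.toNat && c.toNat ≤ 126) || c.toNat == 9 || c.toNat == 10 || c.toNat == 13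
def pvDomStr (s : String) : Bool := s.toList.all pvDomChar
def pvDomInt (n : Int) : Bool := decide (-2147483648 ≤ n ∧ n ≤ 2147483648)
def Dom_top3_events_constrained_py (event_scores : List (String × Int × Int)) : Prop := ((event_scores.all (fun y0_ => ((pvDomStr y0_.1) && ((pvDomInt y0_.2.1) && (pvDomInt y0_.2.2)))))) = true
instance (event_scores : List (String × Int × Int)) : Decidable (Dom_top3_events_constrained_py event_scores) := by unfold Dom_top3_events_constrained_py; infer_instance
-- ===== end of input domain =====

-- B replaces A's two sorts + index-merge loop by a single O(n) pass keeping the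
-- best fifty and the stable top-3 non-fifties, plus one bounded insert (objective: faster).
-- The input association list is read with Python-dict semantics (PySem.Dict.ofList) in both ports.

-- ===== PORT A =====
-- items() of the Python dict {(s, d): p}, as (s, d, p) triples
def pvItems (event_scores : List (String × Int × Int)) : List (String × Int × Int) :=
  ((PySem.Dict.ofList (event_scores.map (fun x => ((x.1, x.2.1), x.2.2)))).items).map
    (fun kp => (kp.1.1, kp.1.2, kp.2))

-- the 'while len(selected) < 3' loop of A
def pvALoop (nf ff : List (String × Int × Int)) (sel : List (String × Int))
    (used50 : Bool) (i : Nat) : List (String × Int) :=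
  if _h : sel.length < 3 then
    let nfCur : Option (String × Int × Int) := nf[i]?
    let fCur : Option (String × Int × Int) :=
      if used50 = false ∧ ff ≠ [] then ff.head? else none
    let nfPts : Int := match nfCur with | some t => t.2.2 | none => -1
    let fPts : Int := match fCur with | some t => t.2.2 | none => -1
    if nfPts < 0 ∧ fPts < 0 then sel
    else if fPts > nfPts then
      match fCur with
      | some f => pvALoop nf ff (sel ++ [(f.1, f.2.1)]) true i
      | none => sel  -- unreachable: fPts > nfPts forces fCur ≠ none
    else
      match nfCur with
      | some t => pvALoop nf ff (sel ++ [(t.1, t.2.1)]) used50 (i + 1)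
      | none => sel
  else sel
termination_by 3 - sel.length
decreasing_by all_goals (simp; omega)

def top3_events_constrained_py (event_scores : List (String × Int × Int)) : List (String × Int) :=
  let items := pvItems event_scores
  let fifties := PySem.List.sorted
    (items.filter (fun x => x.2.1 == 50 && decide (0 < x.2.2))) (fun x => -x.2.2) false
  let nonFifties := PySem.List.sorted
    (items.filter (fun x => !(x.2.1 == 50) && decide (0 < x.2.2))) (fun x => -x.2.2) false
  PySem.Set.ofList (pvALoop nonFifties fifties [] false 0)

-- ===== PORT B =====
-- Source B's _insert_desc: insert into a descending list, after equal scores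
def pvBInsert (f : String × Int × Int) : List (String × Int × Int) → List (String × Int × Int)
  | [] => [f]
  | y :: ys => if f.2.2 ≤ y.2.2 then y :: pvBInsert f ys else f :: y :: ys

def pvBeats (x : String × Int × Int) : Option (String × Int × Int) → Bool
  | none => true
  | some y => decide (y.2.2 < x.2.2)

-- one step of Source B's single pass; state = (best50, (t1, t2, t3))
def pvBStep (st : Option (String × Int × Int) ×
      Option (String × Int × Int) × Option (String × Int × Int) × Option (String × Int × Int))
    (x : String × Int × Int) :
    Option (String × Int × Int) ×
      Option (String × Int × Int) × Option (String × Int × Int) × Option (String × Int × Int) :=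
  let (b50, t1, t2, t3) := st
  if x.2.2 ≤ 0 then st
  else if x.2.1 == 50 then
    match b50 with
    | none => (some x, t1, t2, t3)
    | some y => if y.2.2 < x.2.2 then (some x, t1, t2, t3) else st
  else if pvBeats x t1 then (b50, some x, t1, t2)
  else if pvBeats x t2 then (b50, t1, some x, t2)
  else if pvBeats x t3 then (b50, t1, t2, some x)
  else st

def top3_events_constrained_py_alt (event_scores : List (String × Int × Int)) : List (String × Int) :=
  let items := pvItems event_scores
  let st := items.foldl pvBStep (none, none, none, none)
  let top := [st.2.1, st.2.2.1, st.2.2.2].filterMap id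
  let merged := match st.1 with | none => top | some f => pvBInsert f top
  PySem.Set.ofList ((merged.take 3).map (fun x => (x.1, x.2.1)))

-- ===== PRECONDITION & SPEC =====
def Spec_top3_events_constrained_py (event_scores : List (String × Int × Int)) (out : List (String × Int)) : Prop := out = top3_events_constrained_py_alt event_scores
instance (event_scores : List (String × Int × Int)) (out : List (String × Int)) : Decidable (Spec_top3_events_constrained_py event_scores out) := by unfold Spec_top3_events_constrained_py; infer_instance

-- ===== CLAIM (what is proved, stated in full; the proofs are below) =====
def Claim_equal_top3_events_constrained_py : Prop := ∀ (event_scores : List (String × Int × Int)), Dom_top3_events_constrained_py event_scores → Spec_top3_events_constrained_py event_scores (top3_events_constrained_py event_scores)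

-- ===== LEMMAS AND PROOFS =====
-- the comparison 'sorted(..., key=lambda x: -x[2])' sorts by
def pvCmp (a b : String × Int × Int) : Bool := decide ((-a.2.2 : Int) < -b.2.2)

-- the best-fifty projection of pvBStep
def pvFStep (b : Option (String × Int × Int)) (x : String × Int × Int) :
    Option (String × Int × Int) :=
  match b with
  | none => some x
  | some y => if y.2.2 < x.2.2 then some x else some y

-- the top-3 projection of pvBStep
def pvTStep (tri : Option (String × Int × Int) × Option (String × Int × Int) × Option (String × Int × Int))
    (x : String × Int × Int) :
    Option (String × Int × Int) × Option (String × Int × Int) × Option (String × Int × Int) :=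
  let (t1, t2, t3) := tri
  if pvBeats x t1 then (some x, t1, t2)
  else if pvBeats x t2 then (t1, some x, t2)
  else if pvBeats x t3 then (t1, t2, some x)
  else tri

-- a list of length ≤ 3 as an option triple
def pvOfL (l : List (String × Int × Int)) :
    Option (String × Int × Int) × Option (String × Int × Int) × Option (String × Int × Int) :=
  (l[0]?, l[1]?, l[2]?)

-- optionally insert the best fifty
def pvMerge (fopt : Option (String × Int × Int)) (l : List (String × Int × Int)) :
    List (String × Int × Int) :=
  match fopt with
  | none => l
  | some f => PySem.List.insertBy pvCmp f l

lemma pvBInsert_eq_insertBy (f : String × Int × Int) (l : List (String × Int × Int)) :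
    pvBInsert f l = PySem.List.insertBy pvCmp f l := by
  induction l with
  | nil => rfl
  | cons y ys ih =>
    simp only [pvBInsert, PySem.List.insertBy, pvCmp, ih]
    by_cases h : f.2.2 ≤ y.2.2 <;> simp [h] <;> omega

lemma pvSorted_snoc (xs : List (String × Int × Int)) (x : String × Int × Int) :
    PySem.List.sorted (xs ++ [x]) (fun t => -t.2.2) false
      = PySem.List.insertBy pvCmp x (PySem.List.sorted xs (fun t => -t.2.2) false) := by
  rw [PySem.List.sorted_eq_foldl_insertBy, PySem.List.sorted_eq_foldl_insertBy, List.foldl_append]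
  rfl

lemma pvTake3_insertBy_take3 (f : String × Int × Int) (l : List (String × Int × Int)) :
    (PySem.List.insertBy pvCmp f (l.take 3)).take 3 = (PySem.List.insertBy pvCmp f l).take 3 := by
  match l with
  | [] => rfl
  | [a] => rfl
  | [a, b] => rfl
  | a :: b :: c :: rest =>
    simp only [List.take, PySem.List.insertBy]
    split_ifs <;> simp [List.take]

lemma pvFold_fstep (xs : List (String × Int × Int)) :
    xs.foldl pvFStep none = (PySem.List.sorted xs (fun t => -t.2.2) false).head? := by
  induction xs using List.reverseRecOn with
  | nil => rfl
  | append_singleton xs x ih =>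
    rw [List.foldl_append, List.foldl_cons, List.foldl_nil, ih, pvSorted_snoc]
    cases h : PySem.List.sorted xs (fun t => -t.2.2) false with
    | nil => rfl
    | cons y t =>
      simp only [PySem.List.insertBy, pvCmp, pvFStep]
      by_cases hc : y.2.2 < x.2.2 <;> simp [hc] <;> omega

lemma pvTStep_ofL (m : List (String × Int × Int)) (hm : m.length ≤ 3) (x : String × Int × Int) :
    pvTStep (pvOfL m) x = pvOfL ((PySem.List.insertBy pvCmp x m).take 3) := by
  match m with
  | [] => rfl
  | [a] =>
    simp only [pvTStep, pvOfL, pvBeats, PySem.List.insertBy, pvCmp]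
    by_cases h : a.2.2 < x.2.2 <;> simp [h] <;> omega
  | [a, b] =>
    simp only [pvTStep, pvOfL, pvBeats, PySem.List.insertBy, pvCmp]
    by_cases h1 : a.2.2 < x.2.2 <;> by_cases h2 : b.2.2 < x.2.2 <;>
      simp [h1, h2] <;> omega
  | [a, b, c] =>
    simp only [pvTStep, pvOfL, pvBeats, PySem.List.insertBy, pvCmp]
    by_cases h1 : a.2.2 < x.2.2 <;> by_cases h2 : b.2.2 < x.2.2 <;>
      by_cases h3 : c.2.2 < x.2.2 <;> simp [h1, h2, h3, List.take] <;> omega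
  | a :: b :: c :: d :: r => simp at hm; omega

lemma pvFold_tstep (xs : List (String × Int × Int)) :
    xs.foldl pvTStep (none, none, none)
      = pvOfL ((PySem.List.sorted xs (fun t => -t.2.2) false).take 3) := by
  induction xs using List.reverseRecOn with
  | nil => rfl
  | append_singleton xs x ih =>
    rw [List.foldl_append, List.foldl_cons, List.foldl_nil, ih, pvSorted_snoc,
      pvTStep_ofL _ (by simpa using List.length_take_le 3 _) x, pvTake3_insertBy_take3]

def pvIsF (x : String × Int × Int) : Bool := x.2.1 == 50 && decide (0 < x.2.2)
def pvIsN (x : String × Int × Int) : Bool := !(x.2.1 == 50) && decide (0 < x.2.2)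

lemma pvFold_decomp (xs : List (String × Int × Int))
    (b : Option (String × Int × Int))
    (tri : Option (String × Int × Int) × Option (String × Int × Int) × Option (String × Int × Int)) :
    xs.foldl pvBStep (b, tri)
      = ((xs.filter pvIsF).foldl pvFStep b, (xs.filter pvIsN).foldl pvTStep tri) := by
  induction xs generalizing b tri with
  | nil => rfl
  | cons x xs ih =>
    by_cases hp : x.2.2 ≤ 0
    · have h1 : pvIsF x = false := by simp [pvIsF]; omega
      have h2 : pvIsN x = false := by simp [pvIsN]; omega
      rw [List.foldl_cons, show pvBStep (b, tri) x = (b, tri) by simp [pvBStep, hp], ih]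
      simp [List.filter_cons, h1, h2]
    · by_cases hd : x.2.1 == 50
      · have h1 : pvIsF x = true := by simp [pvIsF] at hd ⊢; exact ⟨hd, by omega⟩
        have h2 : pvIsN x = false := by simp [pvIsN]; intro h; simp at hd; omega
        simp only [List.foldl_cons, List.filter_cons, h1, h2]
        rw [show pvBStep (b, tri) x = (pvFStep b x, tri) by
          obtain ⟨t1, t2, t3⟩ := tri
          simp only [pvBStep, pvFStep, if_neg hp, if_pos hd]
          cases b with
          | none => rfl
          | some y => by_cases hc : y.2.2 < x.2.2 <;> simp [hc], ih]
        simp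
      · have h1 : pvIsF x = false := by simp [pvIsF]; intro h; simp at hd; omega
        have h2 : pvIsN x = true := by simp [pvIsN] at hd ⊢; exact ⟨hd, by omega⟩
        simp only [List.foldl_cons, List.filter_cons, h1, h2]
        rw [show pvBStep (b, tri) x = (b, pvTStep tri x) by
          obtain ⟨t1, t2, t3⟩ := tri
          simp only [pvBStep, pvTStep, if_neg hp]
          rw [if_neg hd]
          split_ifs <;> rfl, ih]
        simp

lemma pvOfL_filterMap (l : List (String × Int × Int)) (hl : l.length ≤ 3) :
    [(pvOfL l).1, (pvOfL l).2.1, (pvOfL l).2.2].filterMap id = l := by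
  match l with
  | [] => rfl
  | [a] => rfl
  | [a, b] => rfl
  | [a, b, c] => rfl
  | a :: b :: c :: d :: r => simp at hl; omega

-- A's merge loop computes: append the projections of take (3 - |sel|) of (best fifty inserted into nf from i)
lemma pvALoop_spec (nf ff : List (String × Int × Int))
    (hnf : ∀ x ∈ nf, 0 < x.2.2) (hff : ∀ x ∈ ff, 0 < x.2.2) :
    ∀ (n : Nat) (sel : List (String × Int)) (used : Bool) (i : Nat), n = 3 - sel.length →
      pvALoop nf ff sel used i
        = sel ++ ((pvMerge (if used then none else ff.head?) (nf.drop i)).take (3 - sel.length)).map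
            (fun x => (x.1, x.2.1)) := by
  intro n
  induction n with
  | zero =>
    intro sel used i h
    rw [pvALoop, dif_neg (by omega), ← h]
    simp
  | succ n ih =>
    intro sel used i h
    have hlen : sel.length < 3 := by omega
    have h3 : 3 - sel.length = n + 1 := by omega
    have h3' : ∀ (x : String × Int), 3 - (sel ++ [x]).length = n := by
      intro x; simp; omega
    have hdrop : nf.drop (i + 1) = (nf.drop i).tail := List.drop_add_one_eq_tail_drop
    have hget : nf[i]? = (nf.drop i).head? := List.head?_drop.symm
    rw [pvALoop, dif_pos hlen]
    cases hdr : nf.drop i with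
    | nil =>
      have hnfi : nf[i]? = none := by rw [hget, hdr]; rfl
      simp only [hnfi]
      cases used with
      | true =>
        simp [pvMerge, hdr]
      | false =>
        cases ff with
        | nil =>
          simp [pvMerge, hdr]
        | cons f fs =>
          have hfp : 0 < f.2.2 := hff f (by simp)
          rw [if_neg (by simp; omega), if_pos (by simp; omega)]
          rw [if_pos (show false = false ∧ f :: fs ≠ [] by simp)]
          simp only [List.head?_cons]
          rw [ih (sel ++ [(f.1, f.2.1)]) true i (h3' _).symm]
          simp only [pvMerge, hdr, h3, h3' (f.1, f.2.1), List.head?_cons, Bool.false_eq_true,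
              ite_true, ite_false]
          simp [PySem.List.insertBy]
    | cons t rest =>
      have hnfi : nf[i]? = some t := by rw [hget, hdr]; rfl
      have ht : 0 < t.2.2 := hnf t (List.mem_of_mem_drop (by rw [hdr]; simp))
      have htail : nf.drop (i + 1) = rest := by rw [hdrop, hdr]; rfl
      simp only [hnfi]
      cases used with
      | true =>
        rw [if_neg (by simp; omega), if_neg (by simp; omega)]
        rw [ih (sel ++ [(t.1, t.2.1)]) true (i + 1) (h3' _).symm]
        simp only [pvMerge, hdr, htail, h3, h3' (t.1, t.2.1), List.take_succ_cons,
          List.map_cons]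
        simp
      | false =>
        cases ff with
        | nil =>
          rw [if_neg (by simp; omega), if_neg (by simp; omega)]
          rw [ih (sel ++ [(t.1, t.2.1)]) false (i + 1) (h3' _).symm]
          simp only [pvMerge, hdr, htail, h3, h3' (t.1, t.2.1), List.head?_nil,
            List.take_succ_cons, List.map_cons]
          simp
        | cons f fs =>
          have hfp : 0 < f.2.2 := hff f (by simp)
          rw [if_neg (by simp; omega)]
          rw [if_pos (show false = false ∧ f :: fs ≠ [] by simp)]
          simp only [List.head?_cons]
          by_cases hc : f.2.2 > t.2.2
          · rw [if_pos hc]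
            rw [ih (sel ++ [(f.1, f.2.1)]) true i (h3' _).symm]
            have hins : PySem.List.insertBy pvCmp f (t :: rest) = f :: t :: rest := by
              simp only [PySem.List.insertBy, pvCmp]
              rw [if_pos (by simp; omega)]
            simp only [pvMerge, hdr, h3, h3' (f.1, f.2.1), List.head?_cons, Bool.false_eq_true,
              ite_true, ite_false]
            rw [hins]
            simp [List.take_succ_cons]
          · rw [if_neg hc]
            rw [ih (sel ++ [(t.1, t.2.1)]) false (i + 1) (h3' _).symm]
            have hins : PySem.List.insertBy pvCmp f (t :: rest)
                = t :: PySem.List.insertBy pvCmp f rest := by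
              simp only [PySem.List.insertBy, pvCmp]
              rw [if_neg (by simp; omega)]
            simp only [pvMerge, hdr, htail, h3, h3' (t.1, t.2.1), List.head?_cons, Bool.false_eq_true,
              ite_true, ite_false]
            rw [hins]
            simp [List.take_succ_cons]

-- ===== VERDICT (by name: the statement is the Claim_ definition above) =====
theorem top3_events_constrained_py_spec : Claim_equal_top3_events_constrained_py := by
  intro es _
  unfold Spec_top3_events_constrained_py
  unfold top3_events_constrained_py top3_events_constrained_py_alt
  simp only []
  set items := pvItems es with hitems
  set FF := items.filter (fun x => x.2.1 == 50 && decide (0 < x.2.2)) with hFF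
  set NF := items.filter (fun x => !(x.2.1 == 50) && decide (0 < x.2.2)) with hNF
  set sFF := PySem.List.sorted FF (fun x => -x.2.2) false with hsFF
  set sNF := PySem.List.sorted NF (fun x => -x.2.2) false with hsNF
  have hposN : ∀ x ∈ sNF, 0 < x.2.2 := by
    intro x hx
    rw [hsNF, PySem.List.mem_sorted] at hx
    have := List.of_mem_filter hx
    simp at this; exact this.2
  have hposF : ∀ x ∈ sFF, 0 < x.2.2 := by
    intro x hx
    rw [hsFF, PySem.List.mem_sorted] at hx
    have := List.of_mem_filter hx
    simp at this; exact this.2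
  -- A's side
  rw [pvALoop_spec sNF sFF hposN hposF 3 [] false 0 rfl]
  -- B's side
  rw [pvFold_decomp]
  rw [show items.filter pvIsF = FF from rfl, show items.filter pvIsN = NF from rfl]
  rw [pvFold_tstep, pvFold_fstep, ← hsFF, ← hsNF]
  rw [pvOfL_filterMap _ (by simpa using List.length_take_le 3 _)]
  congr 1
  cases hh : sFF.head? with
  | none =>
    simp only [pvMerge, List.drop_zero, List.nil_append]
    rw [List.take_take]
    rfl
  | some f =>
    simp only [pvMerge, List.drop_zero, List.nil_append]
    rw [pvBInsert_eq_insertBy, pvTake3_insertBy_take3]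
    simp
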